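-- pv_equiv track=rewrite | github.com/varun28sharma/Bluesss | archive/bluelock_smart.py | _get_device_priority
-- ===== SOURCE A (Python) =====
-- def _get_device_priority(device_name: str) -> int:
--     """Assign priority to devices for auto-selection (higher = better for proximity)"""
--     name_lower = device_name.lower()
--
--     # Audio devices work best for proximity detection
--     if any(keyword in name_lower for keyword in ['buds', 'airpods', 'headphone', 'earphone', 'speaker']):
--         return 10
--     if any(keyword in name_lower for keyword in ['audio', 'sound', 'music']):
--         return 8
--     if any(keyword in name_lower for keyword in ['watch', 'band', 'fitness']):
--         return 7
--     if any(keyword in name_lower for keyword in ['mouse', 'keyboard']):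
--         return 5
--     if any(keyword in name_lower for keyword in ['phone', 'mobile']):
--         return 3
--
--     return 1  # Default priority
-- ===== SOURCE B (Python) =====
-- _PRIORITY = {
--     'buds': 10, 'airpods': 10, 'headphone': 10, 'earphone': 10, 'speaker': 10,
--     'audio': 8, 'sound': 8, 'music': 8,
--     'watch': 7, 'band': 7, 'fitness': 7,
--     'mouse': 5, 'keyboard': 5,
--     'phone': 3, 'mobile': 3,
-- }
--
-- def _get_device_priority(device_name: str) -> int:
--     """Assign priority to devices for auto-selection (higher = better for proximity)"""
--     name_lower = device_name.lower()
--     return max((score for keyword, score in _PRIORITY.items() if keyword in name_lower),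
--                default=1)
-- ===== Notes on version B (the rewrite author's own statement) =====
-- stated objective: simpler
-- what changed: Replaces the five-tier short-circuit if-chain with one flat keyword-to-score table and a single max-reduction over all matching keywords (default 1); equivalent because the tiers are in strictly descending score order, so the first match is always the maximum.
import Mathlib
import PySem

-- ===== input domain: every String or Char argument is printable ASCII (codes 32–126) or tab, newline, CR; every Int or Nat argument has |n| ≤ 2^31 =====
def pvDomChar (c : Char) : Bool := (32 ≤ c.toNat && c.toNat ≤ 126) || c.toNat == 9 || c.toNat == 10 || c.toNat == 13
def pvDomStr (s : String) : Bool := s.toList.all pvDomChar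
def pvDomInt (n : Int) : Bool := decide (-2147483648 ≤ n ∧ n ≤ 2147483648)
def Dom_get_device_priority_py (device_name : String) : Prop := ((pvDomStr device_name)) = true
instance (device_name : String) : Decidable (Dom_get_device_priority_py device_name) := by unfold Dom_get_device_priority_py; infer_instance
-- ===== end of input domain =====

-- B replaces A's five-tier short-circuit if-chain by one flat keyword→score table and a
-- single max-reduction over all matching keywords (default 1): simpler, not faster.

-- ===== PORT A =====
def get_device_priority_py (device_name : String) : Int :=
  let name_lower := PySem.Str.lower device_name
  if (["buds", "airpods", "headphone", "earphone", "speaker"].any fun keyword => PySem.Str.isIn keyword name_lower) then 10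
  else if (["audio", "sound", "music"].any fun keyword => PySem.Str.isIn keyword name_lower) then 8
  else if (["watch", "band", "fitness"].any fun keyword => PySem.Str.isIn keyword name_lower) then 7
  else if (["mouse", "keyboard"].any fun keyword => PySem.Str.isIn keyword name_lower) then 5
  else if (["phone", "mobile"].any fun keyword => PySem.Str.isIn keyword name_lower) then 3
  else 1

-- ===== PORT B =====
-- the _PRIORITY dict of Source B (str → int, insertion order)
def pvPriorityTable : List (String × Int) :=
  [("buds", 10), ("airpods", 10), ("headphone", 10), ("earphone", 10), ("speaker", 10),
   ("audio", 8), ("sound", 8), ("music", 8),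
   ("watch", 7), ("band", 7), ("fitness", 7),
   ("mouse", 5), ("keyboard", 5),
   ("phone", 3), ("mobile", 3)]

def get_device_priority_py_alt (device_name : String) : Int :=
  let name_lower := PySem.Str.lower device_name
  let scores := (pvPriorityTable.filter fun kv => PySem.Str.isIn kv.1 name_lower).map fun kv => kv.2
  (PySem.List.max? scores fun x => x).getD 1

-- ===== PRECONDITION & SPEC =====
def Spec_get_device_priority_py (device_name : String) (out : Int) : Prop := out = get_device_priority_py_alt device_name
instance (device_name : String) (out : Int) : Decidable (Spec_get_device_priority_py device_name out) := by unfold Spec_get_device_priority_py; infer_instance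

-- ===== CLAIM (what is proved, stated in full; the proofs are below) =====
def Claim_equal_get_device_priority_py : Prop := ∀ (device_name : String), Dom_get_device_priority_py device_name → Spec_get_device_priority_py device_name (get_device_priority_py device_name)

-- ===== LEMMAS AND PROOFS =====

-- max(l, default=1) equals s when s ∈ l and s bounds l from above
lemma pvMaxD_eq {l : List Int} {s : Int} (hs : s ∈ l) (hub : ∀ y ∈ l, y ≤ s) :
    (PySem.List.max? l fun x => x).getD 1 = s := by
  cases l with
  | nil => cases hs
  | cons x t =>
      rw [PySem.List.max?_id_cons]
      have h1 := PySem.List.le_foldl_max t x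
      have h2 := PySem.List.foldl_max_mem t x
      have hle : List.foldl max x t ≤ s := by
        rcases h2 with h | h
        · rw [h]; exact hub x (List.mem_cons_self ..)
        · exact hub _ (List.mem_cons_of_mem _ h)
      have hge : s ≤ List.foldl max x t := by
        rcases List.mem_cons.mp hs with h | h
        · exact h ▸ h1.1
        · exact h1.2 s h
      simpa using le_antisymm hle hge

-- a matching table entry puts its score in B's filtered list
lemma pvScore_mem {p : String → Bool} {kv : String × Int}
    (hmem : kv ∈ pvPriorityTable) (hp : p kv.1 = true) :
    kv.2 ∈ (pvPriorityTable.filter fun kv => p kv.1).map fun kv => kv.2 :=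
  List.mem_map.mpr ⟨kv, List.mem_filter.mpr ⟨hmem, hp⟩, rfl⟩

-- ===== VERDICT (by name: the statement is the Claim_ definition above) =====
theorem get_device_priority_py_spec : Claim_equal_get_device_priority_py := by
  intro device_name _
  unfold Spec_get_device_priority_py get_device_priority_py get_device_priority_py_alt
  by_cases h1 : (["buds", "airpods", "headphone", "earphone", "speaker"].any fun keyword => PySem.Str.isIn keyword (PySem.Str.lower device_name)) = true
  · rw [if_pos h1]
    rcases List.any_eq_true.mp h1 with ⟨k, hk, hpk⟩
    have hpk' : PySem.Str.isIn k (PySem.Str.lower device_name) = true := hpk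
    have hmem : (k, (10 : Int)) ∈ pvPriorityTable := by fin_cases hk <;> simp [pvPriorityTable]
    have hub : ∀ kv ∈ pvPriorityTable, PySem.Str.isIn kv.1 (PySem.Str.lower device_name) = true → kv.2 ≤ (10 : Int) := by
      intro kv hm hpm
      simp only [pvPriorityTable, List.mem_cons, List.not_mem_nil, or_false] at hm
      rcases hm with rfl | rfl | rfl | rfl | rfl | rfl | rfl | rfl | rfl | rfl | rfl | rfl | rfl | rfl | rfl <;> simp_all
    refine Eq.symm ?_
    have := pvMaxD_eq (pvScore_mem (p := fun kw => PySem.Str.isIn kw (PySem.Str.lower device_name)) hmem hpk')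
      (by intro y hy
          rcases List.mem_map.mp hy with ⟨kv, hkv, hv⟩
          rcases List.mem_filter.mp hkv with ⟨hm2, hp2⟩
          exact hv ▸ hub kv hm2 hp2)
    exact this
  · rw [if_neg h1]
    simp only [List.any_cons, List.any_nil, Bool.or_false, Bool.or_eq_true_iff, not_or,
      Bool.not_eq_true] at h1
    obtain ⟨h1k0, h1k1, h1k2, h1k3, h1k4⟩ := h1
    by_cases h2 : (["audio", "sound", "music"].any fun keyword => PySem.Str.isIn keyword (PySem.Str.lower device_name)) = true
    · rw [if_pos h2]
      rcases List.any_eq_true.mp h2 with ⟨k, hk, hpk⟩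
      have hpk' : PySem.Str.isIn k (PySem.Str.lower device_name) = true := hpk
      have hmem : (k, (8 : Int)) ∈ pvPriorityTable := by fin_cases hk <;> simp [pvPriorityTable]
      have hub : ∀ kv ∈ pvPriorityTable, PySem.Str.isIn kv.1 (PySem.Str.lower device_name) = true → kv.2 ≤ (8 : Int) := by
        intro kv hm hpm
        simp only [pvPriorityTable, List.mem_cons, List.not_mem_nil, or_false] at hm
        rcases hm with rfl | rfl | rfl | rfl | rfl | rfl | rfl | rfl | rfl | rfl | rfl | rfl | rfl | rfl | rfl <;> simp_all
      refine Eq.symm ?_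
      have := pvMaxD_eq (pvScore_mem (p := fun kw => PySem.Str.isIn kw (PySem.Str.lower device_name)) hmem hpk')
        (by intro y hy
            rcases List.mem_map.mp hy with ⟨kv, hkv, hv⟩
            rcases List.mem_filter.mp hkv with ⟨hm2, hp2⟩
            exact hv ▸ hub kv hm2 hp2)
      exact this
    · rw [if_neg h2]
      simp only [List.any_cons, List.any_nil, Bool.or_false, Bool.or_eq_true_iff, not_or,
        Bool.not_eq_true] at h2
      obtain ⟨h2k0, h2k1, h2k2⟩ := h2
      by_cases h3 : (["watch", "band", "fitness"].any fun keyword => PySem.Str.isIn keyword (PySem.Str.lower device_name)) = true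
      · rw [if_pos h3]
        rcases List.any_eq_true.mp h3 with ⟨k, hk, hpk⟩
        have hpk' : PySem.Str.isIn k (PySem.Str.lower device_name) = true := hpk
        have hmem : (k, (7 : Int)) ∈ pvPriorityTable := by fin_cases hk <;> simp [pvPriorityTable]
        have hub : ∀ kv ∈ pvPriorityTable, PySem.Str.isIn kv.1 (PySem.Str.lower device_name) = true → kv.2 ≤ (7 : Int) := by
          intro kv hm hpm
          simp only [pvPriorityTable, List.mem_cons, List.not_mem_nil, or_false] at hm
          rcases hm with rfl | rfl | rfl | rfl | rfl | rfl | rfl | rfl | rfl | rfl | rfl | rfl | rfl | rfl | rfl <;> simp_all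
        refine Eq.symm ?_
        have := pvMaxD_eq (pvScore_mem (p := fun kw => PySem.Str.isIn kw (PySem.Str.lower device_name)) hmem hpk')
          (by intro y hy
              rcases List.mem_map.mp hy with ⟨kv, hkv, hv⟩
              rcases List.mem_filter.mp hkv with ⟨hm2, hp2⟩
              exact hv ▸ hub kv hm2 hp2)
        exact this
      · rw [if_neg h3]
        simp only [List.any_cons, List.any_nil, Bool.or_false, Bool.or_eq_true_iff, not_or,
          Bool.not_eq_true] at h3
        obtain ⟨h3k0, h3k1, h3k2⟩ := h3
        by_cases h4 : (["mouse", "keyboard"].any fun keyword => PySem.Str.isIn keyword (PySem.Str.lower device_name)) = true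
        · rw [if_pos h4]
          rcases List.any_eq_true.mp h4 with ⟨k, hk, hpk⟩
          have hpk' : PySem.Str.isIn k (PySem.Str.lower device_name) = true := hpk
          have hmem : (k, (5 : Int)) ∈ pvPriorityTable := by fin_cases hk <;> simp [pvPriorityTable]
          have hub : ∀ kv ∈ pvPriorityTable, PySem.Str.isIn kv.1 (PySem.Str.lower device_name) = true → kv.2 ≤ (5 : Int) := by
            intro kv hm hpm
            simp only [pvPriorityTable, List.mem_cons, List.not_mem_nil, or_false] at hm
            rcases hm with rfl | rfl | rfl | rfl | rfl | rfl | rfl | rfl | rfl | rfl | rfl | rfl | rfl | rfl | rfl <;> simp_all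
          refine Eq.symm ?_
          have := pvMaxD_eq (pvScore_mem (p := fun kw => PySem.Str.isIn kw (PySem.Str.lower device_name)) hmem hpk')
            (by intro y hy
                rcases List.mem_map.mp hy with ⟨kv, hkv, hv⟩
                rcases List.mem_filter.mp hkv with ⟨hm2, hp2⟩
                exact hv ▸ hub kv hm2 hp2)
          exact this
        · rw [if_neg h4]
          simp only [List.any_cons, List.any_nil, Bool.or_false, Bool.or_eq_true_iff, not_or,
            Bool.not_eq_true] at h4
          obtain ⟨h4k0, h4k1⟩ := h4
          by_cases h5 : (["phone", "mobile"].any fun keyword => PySem.Str.isIn keyword (PySem.Str.lower device_name)) = true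
          · rw [if_pos h5]
            rcases List.any_eq_true.mp h5 with ⟨k, hk, hpk⟩
            have hpk' : PySem.Str.isIn k (PySem.Str.lower device_name) = true := hpk
            have hmem : (k, (3 : Int)) ∈ pvPriorityTable := by fin_cases hk <;> simp [pvPriorityTable]
            have hub : ∀ kv ∈ pvPriorityTable, PySem.Str.isIn kv.1 (PySem.Str.lower device_name) = true → kv.2 ≤ (3 : Int) := by
              intro kv hm hpm
              simp only [pvPriorityTable, List.mem_cons, List.not_mem_nil, or_false] at hm
              rcases hm with rfl | rfl | rfl | rfl | rfl | rfl | rfl | rfl | rfl | rfl | rfl | rfl | rfl | rfl | rfl <;> simp_all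
            refine Eq.symm ?_
            have := pvMaxD_eq (pvScore_mem (p := fun kw => PySem.Str.isIn kw (PySem.Str.lower device_name)) hmem hpk')
              (by intro y hy
                  rcases List.mem_map.mp hy with ⟨kv, hkv, hv⟩
                  rcases List.mem_filter.mp hkv with ⟨hm2, hp2⟩
                  exact hv ▸ hub kv hm2 hp2)
            exact this
          · rw [if_neg h5]
            simp only [List.any_cons, List.any_nil, Bool.or_false, Bool.or_eq_true_iff, not_or,
              Bool.not_eq_true] at h5
            obtain ⟨h5k0, h5k1⟩ := h5
            simp_all [pvPriorityTable, PySem.List.max?]
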